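-- pv_equiv track=rewrite | github.com/DiLi-Lab/ScanDL | model_analyses/model_inspection.py | get_regressions
-- ===== SOURCE A (Python) =====
-- def get_regressions(ids, sent_length):
--     regression = [0] * sent_length
--     for i in range(0, sent_length-1):
--         if i not in ids:
--             regression[i] = 0
--         else:
--             j = ids.index(i)
--             # find index of next word in sequence
--             for k in range(j, len(ids)):
--                 if ids[k] > ids[j]:
--                     break
--                 elif ids[k] == ids[j]:
--                     pass
--                 elif ids[k] < ids[j]:
--                     regression[i] = 1
--                     break
--     return regression
-- ===== SOURCE B (Python) =====
-- def get_regressions(ids, sent_length):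
--     # Different algorithm: compress ids into runs of equal values once (O(n)),
--     # then a value i is a regression iff the run following i's first run has a
--     # smaller value; A instead rescans ids for every position (O(sent_length*n)).
--     runs = []
--     for x in ids:
--         if not runs or runs[-1] != x:
--             runs.append(x)
--     seen = set()
--     smaller = set()  # values whose first run is followed by a smaller value
--     for v, nxt in zip(runs, runs[1:]):
--         if v not in seen:
--             seen.add(v)
--             if nxt < v:
--                 smaller.add(v)
--     out = [1 if i in smaller else 0 for i in range(sent_length - 1)]
--     if sent_length >= 1:
--         out.append(0)
--     return out
-- ===== Notes on version B (the rewrite author's own statement) =====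
-- stated objective: faster
-- what changed: B run-length compresses ids into runs in one pass and reads each value's regression flag off the run following its first run, instead of A's inner rescan of ids for every position i.
import Mathlib
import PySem

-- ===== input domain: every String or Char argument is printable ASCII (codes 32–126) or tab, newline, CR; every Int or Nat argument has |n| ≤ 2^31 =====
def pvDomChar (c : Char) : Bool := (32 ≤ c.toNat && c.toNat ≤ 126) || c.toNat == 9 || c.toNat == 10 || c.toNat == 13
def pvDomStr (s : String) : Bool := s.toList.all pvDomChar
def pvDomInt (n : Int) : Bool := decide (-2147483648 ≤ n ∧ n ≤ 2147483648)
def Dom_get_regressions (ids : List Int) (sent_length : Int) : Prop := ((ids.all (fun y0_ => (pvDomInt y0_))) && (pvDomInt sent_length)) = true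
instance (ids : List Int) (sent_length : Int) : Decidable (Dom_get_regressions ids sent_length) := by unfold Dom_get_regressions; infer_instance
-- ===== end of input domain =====

-- B re-implements A by run-length compressing ids once and looking at each value's first run,
-- instead of A's per-position rescan of ids; same return value on every input.

-- ===== PORT A =====
-- inner 'for k in range(j, len(ids))' loop of A (break → return the regression list)
def getRegInner (ids regression : List Int) (i j : Int) : List Int → List Int
  | [] => regression
  | k :: rest =>
    if PySem.List.pyGetD ids k 0 > PySem.List.pyGetD ids j 0 then regression
    else if PySem.List.pyGetD ids k 0 == PySem.List.pyGetD ids j 0 then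
      getRegInner ids regression i j rest
    else PySem.List.pySetD regression i 1

-- body of A's 'for i in range(0, sent_length-1)' loop
def getRegStep (ids regression : List Int) (i : Int) : List Int :=
  if ids.contains i = false then PySem.List.pySetD regression i 0
  else
    match PySem.List.index? ids i with
    | none => regression
    | some j => getRegInner ids regression i (Int.ofNat j)
        (PySem.List.pyRange (Int.ofNat j) (ids.length : Int) 1)

def get_regressions (ids : List Int) (sent_length : Int) : List Int :=
  (PySem.List.pyRange 0 (sent_length - 1) 1).foldl (getRegStep ids)
    (List.replicate sent_length.toNat 0)

-- ===== PORT B =====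
-- 'for x in ids: if not runs or runs[-1] != x: runs.append(x)'
def altRunsStep (runs : List Int) (x : Int) : List Int :=
  if runs.isEmpty || !(PySem.List.pyGetD runs (-1) 0 == x) then runs ++ [x] else runs

def altRuns (ids : List Int) : List Int := ids.foldl altRunsStep []

-- body of B's 'for v, nxt in zip(runs, runs[1:])' loop; state = (seen, smaller)
def altScanStep (st : PySem.Set Int × PySem.Set Int) (p : Int × Int) :
    PySem.Set Int × PySem.Set Int :=
  if PySem.Set.contains st.1 p.1 then st
  else (PySem.Set.add st.1 p.1, if p.2 < p.1 then PySem.Set.add st.2 p.1 else st.2)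

def get_regressions_alt (ids : List Int) (sent_length : Int) : List Int :=
  let runs := altRuns ids
  let smaller := ((runs.zip (PySem.List.slice runs (some 1) none)).foldl altScanStep
    (PySem.Set.empty, PySem.Set.empty)).2
  let out := (PySem.List.pyRange 0 (sent_length - 1) 1).map
    (fun i => if PySem.Set.contains smaller i then (1 : Int) else 0)
  if sent_length ≥ 1 then out ++ [0] else out

-- ===== PRECONDITION & SPEC =====
def Spec_get_regressions (ids : List Int) (sent_length : Int) (out : List Int) : Prop := out = get_regressions_alt ids sent_length
instance (ids : List Int) (sent_length : Int) (out : List Int) : Decidable (Spec_get_regressions ids sent_length out) := by unfold Spec_get_regressions; infer_instance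

-- ===== CLAIM (what is proved, stated in full; the proofs are below) =====
def Claim_equal_get_regressions : Prop := ∀ (ids : List Int) (sent_length : Int), Dom_get_regressions ids sent_length → Spec_get_regressions ids sent_length (get_regressions ids sent_length)

-- ===== LEMMAS AND PROOFS =====

-- first element of l that differs from a (the element A's inner scan breaks on)
def firstDiff (a : Int) : List Int → Option Int
  | [] => none
  | x :: t => if x = a then firstDiff a t else some x

-- run-length compression relative to an optional previous value
def rleFrom (prev : Option Int) : List Int → List Int
  | [] => []
  | x :: t => if prev = some x then rleFrom prev t else x :: rleFrom (some x) t

-- the element following the first occurrence of i in l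
def succFirst (i : Int) : List Int → Option Int
  | a :: b :: t => if a = i then some b else succFirst i (b :: t)
  | _ => none

-- the value both programs compute for position i
def fSpec (ids : List Int) (i : Int) : Int :=
  match PySem.List.index? ids i with
  | some j =>
    match firstDiff i (ids.drop j) with
    | some v => if v < i then 1 else 0
    | none => 0
  | none => 0

theorem mem_rleFrom {x : Int} : ∀ (prev : Option Int) (l : List Int), x ∈ rleFrom prev l → x ∈ l := by
  intro prev l
  induction l generalizing prev with
  | nil => simp [rleFrom]
  | cons a t ih =>
    simp only [rleFrom]
    split
    · intro h; exact List.mem_cons_of_mem _ (ih _ h)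
    · intro h
      rcases List.mem_cons.mp h with h | h
      · exact h ▸ List.mem_cons_self
      · exact List.mem_cons_of_mem _ (ih _ h)

theorem succFirst_none_of_not_mem (i : Int) : ∀ (l : List Int), i ∉ l → succFirst i l = none := by
  intro l
  induction l with
  | nil => simp [succFirst]
  | cons a t ih =>
    intro h
    match t with
    | [] => rfl
    | b :: t' =>
      simp only [succFirst]
      rw [if_neg (by simp at h; exact fun e => h.1 e.symm)]
      exact ih (fun hm => h (List.mem_cons_of_mem _ hm))

theorem head?_rleFrom (u : Int) : ∀ (t : List Int), (rleFrom (some u) t).head? = firstDiff u t := by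
  intro t
  induction t generalizing u with
  | nil => rfl
  | cons x t' ih =>
    simp only [rleFrom, firstDiff]
    by_cases h : x = u
    · subst h; simp [ih]
    · rw [if_neg (by simpa using Ne.symm h), if_neg h]; rfl

theorem rleFrom_ne_nil (u i : Int) : ∀ (t : List Int), i ∈ t → i ≠ u → rleFrom (some u) t ≠ [] := by
  intro t
  induction t generalizing u with
  | nil => simp
  | cons x t' ih =>
    intro hm hne
    simp only [rleFrom]
    by_cases h : u = x
    · rw [if_pos (by simp [h])]
      rcases List.mem_cons.mp hm with h' | h'
      · exact absurd (h' ▸ h.symm) hne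
      · exact ih u h' hne
    · rw [if_neg (by simpa using h)]; simp

theorem succFirst_cons_self (i : Int) (r : List Int) : succFirst i (i :: r) = r.head? := by
  cases r <;> simp [succFirst]

theorem succFirst_cons_ne (i x : Int) (hx : x ≠ i) (r : List Int) (hr : r ≠ []) :
    succFirst i (x :: r) = succFirst i r := by
  rcases List.exists_cons_of_ne_nil hr with ⟨c, cs, rfl⟩
  simp [succFirst, hx]

theorem succFirst_rleFrom : ∀ (l : List Int) (prev : Option Int) (i : Int), prev ≠ some i →
    succFirst i (rleFrom prev l) =
      (match PySem.List.index? l i with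
       | some j => firstDiff i (l.drop j)
       | none => none) := by
  intro l
  induction l with
  | nil => intro prev i _; simp [rleFrom, succFirst, PySem.List.index?]
  | cons x t ih =>
    intro prev i hprev
    by_cases hx : x = i
    · subst hx
      rw [show rleFrom prev (x :: t) = x :: rleFrom (some x) t from by
            simp only [rleFrom]; rw [if_neg hprev],
          succFirst_cons_self, head?_rleFrom,
          PySem.List.index?_cons_self]
      simp [firstDiff]
    · rw [PySem.List.index?_cons_of_ne _ (fun h => hx h)]
      cases hidx : PySem.List.index? t i with
      | none =>
        have hnm : i ∉ (x :: t) := by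
          rw [PySem.List.index?_eq_none_iff] at hidx
          simp only [List.mem_cons, not_or]
          exact ⟨fun h => hx h.symm, hidx⟩
        simp only [Option.map_none]
        exact succFirst_none_of_not_mem _ _
          (fun hm => hnm (mem_rleFrom _ _ hm))
      | some j =>
        have hmem : i ∈ t := by
          rw [← PySem.List.index?_isSome_iff (v := i)]
          rw [hidx]; rfl
        simp only [Option.map_some, List.drop_succ_cons]
        by_cases hp : prev = some x
        · rw [show rleFrom prev (x :: t) = rleFrom prev t from by
                simp only [rleFrom]; rw [if_pos hp]]
          rw [ih prev i hprev, hidx]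
        · rw [show rleFrom prev (x :: t) = x :: rleFrom (some x) t from by
                simp only [rleFrom]; rw [if_neg hp]]
          rw [succFirst_cons_ne i x hx _ (rleFrom_ne_nil x i t hmem (fun h => hx h.symm)),
              ih (some x) i (by simpa using fun h => hx h), hidx]

theorem foldl_altRunsStep : ∀ (l acc : List Int), l.foldl altRunsStep acc = acc ++ rleFrom acc.getLast? l := by
  intro l
  induction l with
  | nil => intro acc; simp [rleFrom]
  | cons x t ih =>
    intro acc
    rw [List.foldl_cons]
    rcases List.eq_nil_or_concat acc with rfl | ⟨pre, u, rfl⟩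
    · rw [show altRunsStep [] x = [x] from rfl, ih]
      simp [rleFrom]
    · rw [List.concat_eq_append] at *
      have hlast : (pre ++ [u]).getLast? = some u := by simp
      by_cases hux : u = x
      · rw [show altRunsStep (pre ++ [u]) x = pre ++ [u] from by
              simp [altRunsStep, PySem.List.pyGetD_neg_one_append_singleton, hux]]
        rw [ih, hlast]
        simp only [rleFrom]
        rw [if_pos (by rw [hux])]
      · rw [show altRunsStep (pre ++ [u]) x = (pre ++ [u]) ++ [x] from by
              simp [altRunsStep, PySem.List.pyGetD_neg_one_append_singleton, hux]]
        rw [ih]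
        simp only [hlast, List.getLast?_concat, rleFrom]
        rw [if_neg (by simpa using hux)]
        simp

theorem altRuns_eq (ids : List Int) : altRuns ids = rleFrom none ids := by
  simpa using foldl_altRunsStep ids []

theorem contains_add_ne (s : PySem.Set Int) (a i : Int) (h : i ≠ a) :
    PySem.Set.contains (PySem.Set.add s a) i = PySem.Set.contains s i := by
  simp [PySem.Set.contains_eq_listContains, PySem.Set.mem_add, h]

theorem contains_add_self (s : PySem.Set Int) (a : Int) :
    PySem.Set.contains (PySem.Set.add s a) a = true := by
  simp [PySem.Set.contains_eq_listContains, PySem.Set.mem_add]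

theorem scan_contains : ∀ (l : List Int) (seen smaller : PySem.Set Int) (i : Int),
    PySem.Set.contains (((l.zip l.tail).foldl altScanStep (seen, smaller)).2) i = true ↔
      (PySem.Set.contains smaller i = true ∨
        (PySem.Set.contains seen i = false ∧ ∃ w, succFirst i l = some w ∧ w < i)) := by
  intro l
  induction l with
  | nil => intro seen smaller i; simp [succFirst]
  | cons a t ih =>
    intro seen smaller i
    match t with
    | [] => simp [succFirst]
    | b :: t' =>
      rw [show (a :: b :: t').zip (a :: b :: t').tail
            = (a, b) :: ((b :: t').zip (b :: t').tail) from rfl]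
      rw [List.foldl_cons]
      by_cases hs : PySem.Set.contains seen a = true
      · rw [show altScanStep (seen, smaller) (a, b) = (seen, smaller) from by
              simp only [altScanStep]; rw [if_pos hs]]
        rw [ih]
        by_cases hia : i = a
        · subst hia
          simp only [succFirst, hs]
          constructor
          · rintro (h | ⟨h, _⟩)
            · exact Or.inl h
            · simp at h
          · rintro (h | ⟨h, _⟩)
            · exact Or.inl h
            · simp at h
        · simp only [succFirst, if_neg (fun h : a = i => hia h.symm)]
      · rw [show altScanStep (seen, smaller) (a, b)
              = (PySem.Set.add seen a, if b < a then PySem.Set.add smaller a else smaller) from by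
              simp only [altScanStep]; rw [if_neg hs]]
        rw [ih]
        by_cases hia : i = a
        · subst hia
          simp only [succFirst, contains_add_self, hs]
          constructor
          · rintro (h | ⟨h, _⟩)
            · by_cases hba : b < i
              · exact Or.inr ⟨by simp, b, rfl, hba⟩
              · rw [if_neg hba] at h; exact Or.inl h
            · simp at h
          · rintro (h | ⟨-, w, hw, hwi⟩)
            · by_cases hba : b < i
              · rw [if_pos hba]; left
                rw [PySem.Set.contains_iff] at h ⊢
                rw [PySem.Set.mem_add]; exact Or.inl h
              · rw [if_neg hba]; exact Or.inl h
            · obtain rfl : b = w := by injection hw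
              rw [if_pos hwi]; left
              exact contains_add_self _ _
        · rw [contains_add_ne _ _ _ hia]
          simp only [succFirst, if_neg (fun h : a = i => hia h.symm)]
          by_cases hba : b < a
          · rw [if_pos hba, contains_add_ne _ _ _ hia]
          · rw [if_neg hba]

theorem getRegInner_eq (ids reg : List Int) (i j : Int) :
    ∀ (d : List Int) (m : Nat), ids.drop m = d →
    getRegInner ids reg i j (PySem.List.pyRange (m : Int) (ids.length : Int) 1) =
      (match firstDiff (PySem.List.pyGetD ids j 0) d with
       | some v => if v < PySem.List.pyGetD ids j 0 then PySem.List.pySetD reg i 1 else reg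
       | none => reg) := by
  intro d
  induction d with
  | nil =>
    intro m hd
    have hlen : ids.length ≤ m := by
      rw [← List.drop_eq_nil_iff]; exact hd
    rw [PySem.List.pyRange_one_eq_nil (by exact_mod_cast hlen)]
    rfl
  | cons x d' ih =>
    intro m hd
    have hm : m < ids.length := by
      by_contra h
      rw [List.drop_eq_nil_of_le (by omega)] at hd
      simp at hd
    have hx : ids[m] = x := by
      have : (ids.drop m)[0]'(by rw [hd]; simp) = x := by simp [hd]
      simpa using this
    rw [PySem.List.pyRange_one_cons (by exact_mod_cast hm)]
    have hget : PySem.List.pyGetD ids (m : Int) 0 = x := by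
      rw [PySem.List.pyGetD_natCast, List.getD_eq_getElem _ _ hm, hx]
    simp only [getRegInner, hget]
    by_cases h1 : x > PySem.List.pyGetD ids j 0
    · rw [if_pos h1]
      rw [show firstDiff (PySem.List.pyGetD ids j 0) (x :: d') = some x from by
            simp [firstDiff, show x ≠ PySem.List.pyGetD ids j 0 by omega]]
      simp [show ¬ x < PySem.List.pyGetD ids j 0 by omega]
    · rw [if_neg h1]
      by_cases h2 : x = PySem.List.pyGetD ids j 0
      · rw [if_pos (by simp [h2])]
        rw [show firstDiff (PySem.List.pyGetD ids j 0) (x :: d')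
              = firstDiff (PySem.List.pyGetD ids j 0) d' from by simp [firstDiff, h2]]
        rw [show ((m : Int) + 1) = ((m + 1 : Nat) : Int) from by push_cast; ring]
        exact ih (m + 1) (by rw [← List.drop_drop]; rw [hd]; rfl)
      · rw [if_neg (by simpa using h2)]
        rw [show firstDiff (PySem.List.pyGetD ids j 0) (x :: d') = some x from by
              simp [firstDiff, h2]]
        simp [show x < PySem.List.pyGetD ids j 0 by omega]

theorem getRegStep_eq (ids reg : List Int) (i : Int) :
    getRegStep ids reg i = PySem.List.pySetD reg i (fSpec ids i) ∨
      (getRegStep ids reg i = reg ∧ fSpec ids i = 0) := by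
  unfold getRegStep fSpec
  by_cases hc : ids.contains i = true
  · have hmem : i ∈ ids := List.mem_of_elem_eq_true hc
    rw [if_neg (by simp [hmem])]
    cases hidx : PySem.List.index? ids i with
    | none =>
      rw [PySem.List.index?_eq_none_iff] at hidx; exact absurd hmem hidx
    | some j =>
      dsimp only
      obtain ⟨hj, hij, -⟩ := PySem.List.getElem_of_index?_eq_some hidx
      have hgj : PySem.List.pyGetD ids ((j : Nat) : Int) 0 = i := by
        rw [PySem.List.pyGetD_natCast, List.getD_eq_getElem _ _ hj, hij]
      rw [show Int.ofNat j = ((j : Nat) : Int) from rfl,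
          getRegInner_eq ids reg i ((j : Nat) : Int) (ids.drop j) j rfl, hgj]
      cases hfd : firstDiff i (ids.drop j) with
      | none => right; exact ⟨rfl, rfl⟩
      | some v =>
        dsimp only
        by_cases hv : v < i
        · left; rw [if_pos hv, if_pos hv]
        · right; rw [if_neg hv]; exact ⟨rfl, by rw [if_neg hv]⟩
  · rw [if_pos (by simpa using hc)]
    rw [show PySem.List.index? ids i = none from by
          rw [PySem.List.index?_eq_none_iff]; simpa using hc]
    left; rfl

theorem alt_value_eq (ids : List Int) (i : Int) :
    (if PySem.Set.contains
        (((altRuns ids).zip ((altRuns ids).tail)).foldl altScanStep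
          (PySem.Set.empty, PySem.Set.empty)).2 i then (1 : Int) else 0) = fSpec ids i := by
  have hscan := scan_contains (altRuns ids) PySem.Set.empty PySem.Set.empty i
  have hempty : PySem.Set.contains (PySem.Set.empty : PySem.Set Int) i = false := rfl
  rw [hempty] at hscan
  have hsucc := succFirst_rleFrom ids none i (by simp)
  rw [← altRuns_eq] at hsucc
  unfold fSpec
  cases hidx : PySem.List.index? ids i with
  | none =>
    rw [hidx] at hsucc; dsimp only at hsucc ⊢
    have hne : PySem.Set.contains (((altRuns ids).zip ((altRuns ids).tail)).foldl altScanStep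
        (PySem.Set.empty, PySem.Set.empty)).2 i ≠ true := by
      intro h
      rw [hscan] at h
      rcases h with h | ⟨-, w, hw, -⟩
      · simp at h
      · rw [hsucc] at hw; simp at hw
    rw [if_neg hne]
  | some j =>
    rw [hidx] at hsucc; dsimp only at hsucc ⊢
    cases hfd : firstDiff i (ids.drop j) with
    | none =>
      rw [hfd] at hsucc; dsimp only
      have hne : PySem.Set.contains (((altRuns ids).zip ((altRuns ids).tail)).foldl altScanStep
          (PySem.Set.empty, PySem.Set.empty)).2 i ≠ true := by
        intro h
        rw [hscan] at h
        rcases h with h | ⟨-, w, hw, -⟩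
        · simp at h
        · rw [hsucc] at hw; simp at hw
      rw [if_neg hne]
    | some v =>
      rw [hfd] at hsucc; dsimp only
      by_cases hv : v < i
      · have hyes : PySem.Set.contains (((altRuns ids).zip ((altRuns ids).tail)).foldl altScanStep
            (PySem.Set.empty, PySem.Set.empty)).2 i = true := by
          rw [hscan]; exact Or.inr ⟨rfl, v, hsucc, hv⟩
        rw [if_pos hyes, if_pos hv]
      · have hne : PySem.Set.contains (((altRuns ids).zip ((altRuns ids).tail)).foldl altScanStep
            (PySem.Set.empty, PySem.Set.empty)).2 i ≠ true := by
          intro h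
          rw [hscan] at h
          rcases h with h | ⟨-, w, hw, hwlt⟩
          · simp at h
          · rw [hsucc] at hw
            obtain rfl : v = w := by injection hw
            exact hv hwlt
        rw [if_neg hne, if_neg hv]

theorem foldl_getRegStep (ids : List Int) (sl : Int) :
    ∀ (m : Nat), (m : Int) ≤ sl - 1 →
    (PySem.List.pyRange 0 (m : Int) 1).foldl (getRegStep ids) (List.replicate sl.toNat 0) =
      (List.range m).map (fun k : Nat => fSpec ids (k : Int)) ++ List.replicate (sl.toNat - m) 0 := by
  intro m
  induction m with
  | zero =>
    intro _
    rw [PySem.List.pyRange_one_eq_nil (by omega)]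
    simp
  | succ m ih =>
    intro h
    have hm : (m : Int) ≤ sl - 1 := by push_cast at h ⊢; omega
    have hsl : m + 2 ≤ sl.toNat := by
      have : (m : Int) + 2 ≤ sl := by push_cast at h; omega
      omega
    rw [show ((m + 1 : Nat) : Int) = (m : Int) + 1 from by push_cast; ring,
        PySem.List.pyRange_one_succ_right (by positivity),
        List.foldl_append, ih hm]
    rw [List.foldl_cons, List.foldl_nil]
    have hrep : List.replicate (sl.toNat - m) (0 : Int)
        = 0 :: List.replicate (sl.toNat - (m + 1)) 0 := by
      rw [show sl.toNat - m = (sl.toNat - (m + 1)) + 1 from by omega]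
      rfl
    have hlen : ((List.range m).map (fun k : Nat => fSpec ids (k : Int))).length = m := by simp
    rw [hrep]
    have hset : ∀ (P R : List Int) (v : Int), P.length = m →
        (P ++ 0 :: R).set m v = P ++ v :: R := by
      intro P R v hP; rw [← hP]; simp
    rcases getRegStep_eq ids
        ((List.range m).map (fun k : Nat => fSpec ids (k : Int))
          ++ 0 :: List.replicate (sl.toNat - (m + 1)) 0) (m : Int) with hstep | ⟨hstep, hf0⟩
    · rw [hstep, PySem.List.pySetD_natCast, hset _ _ _ hlen]
      simp [List.range_succ]
    · rw [hstep]
      simp [List.range_succ, hf0]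

theorem main_eq (ids : List Int) (sl : Int) :
    get_regressions ids sl = get_regressions_alt ids sl := by
  unfold get_regressions get_regressions_alt
  dsimp only
  rw [PySem.List.slice_from_one]
  by_cases hsl : 1 ≤ sl
  · have hm : (sl - 1) = (((sl - 1).toNat : Nat) : Int) := by
      rw [Int.toNat_of_nonneg (by omega)]
    rw [if_pos hsl, hm, foldl_getRegStep ids sl ((sl - 1).toNat) (by omega)]
    have htn : sl.toNat - (sl - 1).toNat = 1 := by omega
    rw [htn]
    congr 1
    rw [PySem.List.pyRange_one 0 (((sl - 1).toNat : Nat) : Int)]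
    rw [List.map_map,
        show ((((sl - 1).toNat : Nat) : Int) - 0).toNat = (sl - 1).toNat from by omega]
    apply List.map_congr_left
    intro k _
    simpa using (alt_value_eq ids (k : Int)).symm
  · rw [if_neg hsl,
        PySem.List.pyRange_one_eq_nil (show sl - 1 ≤ 0 by omega)]
    simp [Int.toNat_of_nonpos (by omega : sl ≤ 0)]

-- ===== VERDICT (by name: the statement is the Claim_ definition above) =====
theorem get_regressions_spec : Claim_equal_get_regressions := by
  intro ids sent_length _
  exact main_eq ids sent_length
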